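-- pv_equiv track=rewrite | github.com/AlvaroNovillo/spotify-metric-app | app/main/routes.py | _compute_market_breakdown
-- ===== SOURCE A (Python) =====
-- _MARKET_REGIONS = {
--     'North America': {'US', 'CA', 'MX'},
--     'Latin America': {
--         'BR', 'AR', 'CL', 'CO', 'PE', 'VE', 'EC', 'BO', 'PY', 'UY',
--         'CR', 'GT', 'HN', 'NI', 'PA', 'SV', 'DO', 'JM', 'TT', 'CU', 'BB',
--     },
--     'Europe': {
--         'GB', 'DE', 'FR', 'ES', 'IT', 'NL', 'BE', 'PT', 'SE', 'NO', 'DK',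
--         'FI', 'PL', 'AT', 'CH', 'CZ', 'HU', 'RO', 'GR', 'HR', 'BG', 'SK',
--         'SI', 'EE', 'LV', 'LT', 'IS', 'IE', 'LU', 'MT', 'CY', 'RS', 'UA',
--     },
--     'Asia Pacific': {
--         'JP', 'AU', 'NZ', 'SG', 'MY', 'TH', 'ID', 'PH', 'VN', 'KR',
--         'TW', 'HK', 'IN', 'PK', 'BD', 'LK', 'NP',
--     },
--     'Middle East & Africa': {
--         'ZA', 'NG', 'GH', 'KE', 'EG', 'MA', 'TN', 'AE', 'SA', 'QA',
--         'KW', 'BH', 'IL', 'TR', 'JO', 'LB', 'OM',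
--     },
-- }
--
-- def _compute_market_breakdown(markets):
--     market_set = set(markets)
--     breakdown = {}
--     uncategorized = set(market_set)
--     for region, codes in _MARKET_REGIONS.items():
--         matched = market_set & codes
--         if matched:
--             breakdown[region] = len(matched)
--         uncategorized -= codes
--     if uncategorized:
--         breakdown['Other'] = len(uncategorized)
--     return breakdown
-- ===== SOURCE B (Python) =====
-- _REGION_OF = {
--     'US': 'North America', 'CA': 'North America', 'MX': 'North America',
--     'BR': 'Latin America', 'AR': 'Latin America', 'CL': 'Latin America',
--     'CO': 'Latin America', 'PE': 'Latin America', 'VE': 'Latin America',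
--     'EC': 'Latin America', 'BO': 'Latin America', 'PY': 'Latin America',
--     'UY': 'Latin America', 'CR': 'Latin America', 'GT': 'Latin America',
--     'HN': 'Latin America', 'NI': 'Latin America', 'PA': 'Latin America',
--     'SV': 'Latin America', 'DO': 'Latin America', 'JM': 'Latin America',
--     'TT': 'Latin America', 'CU': 'Latin America', 'BB': 'Latin America',
--     'GB': 'Europe', 'DE': 'Europe', 'FR': 'Europe',
--     'ES': 'Europe', 'IT': 'Europe', 'NL': 'Europe',
--     'BE': 'Europe', 'PT': 'Europe', 'SE': 'Europe',
--     'NO': 'Europe', 'DK': 'Europe', 'FI': 'Europe',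
--     'PL': 'Europe', 'AT': 'Europe', 'CH': 'Europe',
--     'CZ': 'Europe', 'HU': 'Europe', 'RO': 'Europe',
--     'GR': 'Europe', 'HR': 'Europe', 'BG': 'Europe',
--     'SK': 'Europe', 'SI': 'Europe', 'EE': 'Europe',
--     'LV': 'Europe', 'LT': 'Europe', 'IS': 'Europe',
--     'IE': 'Europe', 'LU': 'Europe', 'MT': 'Europe',
--     'CY': 'Europe', 'RS': 'Europe', 'UA': 'Europe',
--     'JP': 'Asia Pacific', 'AU': 'Asia Pacific', 'NZ': 'Asia Pacific',
--     'SG': 'Asia Pacific', 'MY': 'Asia Pacific', 'TH': 'Asia Pacific',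
--     'ID': 'Asia Pacific', 'PH': 'Asia Pacific', 'VN': 'Asia Pacific',
--     'KR': 'Asia Pacific', 'TW': 'Asia Pacific', 'HK': 'Asia Pacific',
--     'IN': 'Asia Pacific', 'PK': 'Asia Pacific', 'BD': 'Asia Pacific',
--     'LK': 'Asia Pacific', 'NP': 'Asia Pacific', 'ZA': 'Middle East & Africa',
--     'NG': 'Middle East & Africa', 'GH': 'Middle East & Africa', 'KE': 'Middle East & Africa',
--     'EG': 'Middle East & Africa', 'MA': 'Middle East & Africa', 'TN': 'Middle East & Africa',
--     'AE': 'Middle East & Africa', 'SA': 'Middle East & Africa', 'QA': 'Middle East & Africa',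
--     'KW': 'Middle East & Africa', 'BH': 'Middle East & Africa', 'IL': 'Middle East & Africa',
--     'TR': 'Middle East & Africa', 'JO': 'Middle East & Africa', 'LB': 'Middle East & Africa',
--     'OM': 'Middle East & Africa',
-- }
--
-- _REGION_ORDER = ['North America', 'Latin America', 'Europe',
--                  'Asia Pacific', 'Middle East & Africa', 'Other']
--
--
-- def _compute_market_breakdown(markets):
--     counts = {}
--     for code in set(markets):
--         region = _REGION_OF.get(code, 'Other')
--         counts[region] = counts.get(region, 0) + 1
--     return {r: counts[r] for r in _REGION_ORDER if r in counts}
-- ===== Notes on version B (the rewrite author's own statement) =====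
-- stated objective: idiomatic
-- what changed: Replaces the five per-region set intersections/differences with a flat code->region reverse-lookup dict and a single counting pass over the deduplicated markets, emitting counts in a fixed region order.
import Mathlib
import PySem

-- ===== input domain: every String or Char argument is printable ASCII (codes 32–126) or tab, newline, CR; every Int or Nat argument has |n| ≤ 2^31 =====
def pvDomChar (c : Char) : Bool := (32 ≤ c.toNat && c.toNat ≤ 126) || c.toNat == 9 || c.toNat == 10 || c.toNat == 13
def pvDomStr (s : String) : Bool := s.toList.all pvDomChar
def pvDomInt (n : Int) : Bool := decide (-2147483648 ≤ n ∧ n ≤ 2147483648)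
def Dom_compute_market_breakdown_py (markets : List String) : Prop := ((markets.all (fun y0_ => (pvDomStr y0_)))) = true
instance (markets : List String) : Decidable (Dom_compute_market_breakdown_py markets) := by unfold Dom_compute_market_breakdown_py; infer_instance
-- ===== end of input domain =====

-- B replaces A's five per-region set intersections/differences with a flat code→region
-- reverse-lookup dict and a single counting pass over the deduplicated markets (idiomatic).

-- ===== PORT A =====
-- the module-level _MARKET_REGIONS table (region name, codes); codes literally in source order
def pvNA : List String := ["US", "CA", "MX"]
def pvLA : List String := ["BR", "AR", "CL", "CO", "PE", "VE", "EC", "BO", "PY", "UY",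
    "CR", "GT", "HN", "NI", "PA", "SV", "DO", "JM", "TT", "CU", "BB"]
def pvEU : List String := ["GB", "DE", "FR", "ES", "IT", "NL", "BE", "PT", "SE", "NO", "DK",
    "FI", "PL", "AT", "CH", "CZ", "HU", "RO", "GR", "HR", "BG", "SK",
    "SI", "EE", "LV", "LT", "IS", "IE", "LU", "MT", "CY", "RS", "UA"]
def pvAP : List String := ["JP", "AU", "NZ", "SG", "MY", "TH", "ID", "PH", "VN", "KR",
    "TW", "HK", "IN", "PK", "BD", "LK", "NP"]
def pvMEA : List String := ["ZA", "NG", "GH", "KE", "EG", "MA", "TN", "AE", "SA", "QA",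
    "KW", "BH", "IL", "TR", "JO", "LB", "OM"]
def pvMarketRegions : List (String × List String) :=
  [("North America", pvNA), ("Latin America", pvLA), ("Europe", pvEU),
   ("Asia Pacific", pvAP), ("Middle East & Africa", pvMEA)]

def compute_market_breakdown_py (markets : List String) : List (String × Int) :=
  let market_set : PySem.Set String := PySem.Set.ofList markets
  let st := pvMarketRegions.foldl
    (fun (st : PySem.Dict String Int × PySem.Set String) rc =>
      let matched := PySem.Set.inter market_set rc.2
      ((if matched ≠ [] then st.1.insert rc.1 (PySem.Set.len matched) else st.1),
       PySem.Set.diff st.2 rc.2))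
    (PySem.Dict.empty, market_set)
  let breakdown := if st.2 ≠ [] then st.1.insert "Other" (PySem.Set.len st.2) else st.1
  breakdown.items

-- ===== PORT B =====
-- the module-level flat literal dict _REGION_OF (code → region) and the fixed output key order
def pvRegionOfPairs : List (String × String) :=
  [("US", "North America"),
   ("CA", "North America"),
   ("MX", "North America"),
   ("BR", "Latin America"),
   ("AR", "Latin America"),
   ("CL", "Latin America"),
   ("CO", "Latin America"),
   ("PE", "Latin America"),
   ("VE", "Latin America"),
   ("EC", "Latin America"),
   ("BO", "Latin America"),
   ("PY", "Latin America"),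
   ("UY", "Latin America"),
   ("CR", "Latin America"),
   ("GT", "Latin America"),
   ("HN", "Latin America"),
   ("NI", "Latin America"),
   ("PA", "Latin America"),
   ("SV", "Latin America"),
   ("DO", "Latin America"),
   ("JM", "Latin America"),
   ("TT", "Latin America"),
   ("CU", "Latin America"),
   ("BB", "Latin America"),
   ("GB", "Europe"),
   ("DE", "Europe"),
   ("FR", "Europe"),
   ("ES", "Europe"),
   ("IT", "Europe"),
   ("NL", "Europe"),
   ("BE", "Europe"),
   ("PT", "Europe"),
   ("SE", "Europe"),
   ("NO", "Europe"),
   ("DK", "Europe"),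
   ("FI", "Europe"),
   ("PL", "Europe"),
   ("AT", "Europe"),
   ("CH", "Europe"),
   ("CZ", "Europe"),
   ("HU", "Europe"),
   ("RO", "Europe"),
   ("GR", "Europe"),
   ("HR", "Europe"),
   ("BG", "Europe"),
   ("SK", "Europe"),
   ("SI", "Europe"),
   ("EE", "Europe"),
   ("LV", "Europe"),
   ("LT", "Europe"),
   ("IS", "Europe"),
   ("IE", "Europe"),
   ("LU", "Europe"),
   ("MT", "Europe"),
   ("CY", "Europe"),
   ("RS", "Europe"),
   ("UA", "Europe"),
   ("JP", "Asia Pacific"),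
   ("AU", "Asia Pacific"),
   ("NZ", "Asia Pacific"),
   ("SG", "Asia Pacific"),
   ("MY", "Asia Pacific"),
   ("TH", "Asia Pacific"),
   ("ID", "Asia Pacific"),
   ("PH", "Asia Pacific"),
   ("VN", "Asia Pacific"),
   ("KR", "Asia Pacific"),
   ("TW", "Asia Pacific"),
   ("HK", "Asia Pacific"),
   ("IN", "Asia Pacific"),
   ("PK", "Asia Pacific"),
   ("BD", "Asia Pacific"),
   ("LK", "Asia Pacific"),
   ("NP", "Asia Pacific"),
   ("ZA", "Middle East & Africa"),
   ("NG", "Middle East & Africa"),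
   ("GH", "Middle East & Africa"),
   ("KE", "Middle East & Africa"),
   ("EG", "Middle East & Africa"),
   ("MA", "Middle East & Africa"),
   ("TN", "Middle East & Africa"),
   ("AE", "Middle East & Africa"),
   ("SA", "Middle East & Africa"),
   ("QA", "Middle East & Africa"),
   ("KW", "Middle East & Africa"),
   ("BH", "Middle East & Africa"),
   ("IL", "Middle East & Africa"),
   ("TR", "Middle East & Africa"),
   ("JO", "Middle East & Africa"),
   ("LB", "Middle East & Africa"),
   ("OM", "Middle East & Africa")]

def pvRegionOf : PySem.Dict String String := PySem.Dict.ofList pvRegionOfPairs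

def pvRegionOrder : List String := ["North America", "Latin America", "Europe",
    "Asia Pacific", "Middle East & Africa", "Other"]

def compute_market_breakdown_py_alt (markets : List String) : List (String × Int) :=
  let counts := (PySem.Set.ofList markets).foldl
    (fun (counts : PySem.Dict String Int) code =>
      let region := pvRegionOf.getD code "Other"
      counts.insert region (counts.getD region 0 + 1))
    PySem.Dict.empty
  (pvRegionOrder.filter (fun r => counts.contains r)).map (fun r => (r, counts.getD r 0))

-- ===== PRECONDITION & SPEC =====
def Spec_compute_market_breakdown_py (markets : List String) (out : List (String × Int)) : Prop := out = compute_market_breakdown_py_alt markets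
instance (markets : List String) (out : List (String × Int)) : Decidable (Spec_compute_market_breakdown_py markets out) := by unfold Spec_compute_market_breakdown_py; infer_instance

-- ===== CLAIM (what is proved, stated in full; the proofs are below) =====
def Claim_equal_compute_market_breakdown_py : Prop := ∀ (markets : List String), Dom_compute_market_breakdown_py markets → Spec_compute_market_breakdown_py markets (compute_market_breakdown_py markets)

-- ===== LEMMAS AND PROOFS =====

-- proof-only normal form: one output piece per region, in the fixed region order
def pvPiece (n : String) (codes : List String) (s : List String) : List (String × Int) :=
  if s.filter (fun c => codes.contains c) ≠ [] then
    [(n, ((s.filter (fun c => codes.contains c)).length : Int))] else []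

def pvOtherPred (c : String) : Bool :=
  !pvMEA.contains c && (!pvAP.contains c && (!pvEU.contains c && (!pvLA.contains c && !pvNA.contains c)))

def pvUncat (s : List String) : List String :=
  ((((s.filter (fun c => !pvNA.contains c)).filter (fun c => !pvLA.contains c)).filter
      (fun c => !pvEU.contains c)).filter (fun c => !pvAP.contains c)).filter (fun c => !pvMEA.contains c)

def pvPieceO (s : List String) : List (String × Int) :=
  if pvUncat s ≠ [] then [("Other", ((pvUncat s).length : Int))] else []

theorem pv_uncat_eq (s : List String) : pvUncat s = s.filter pvOtherPred := by
  unfold pvUncat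
  simp only [List.filter_filter]
  exact List.filter_congr (fun c _ => by
    unfold pvOtherPred
    cases pvNA.contains c <;> cases pvLA.contains c <;> cases pvEU.contains c <;>
      cases pvAP.contains c <;> cases pvMEA.contains c <;> rfl)

def pvNF (s : List String) : List (String × Int) :=
  pvPiece "North America" pvNA s ++ pvPiece "Latin America" pvLA s ++ pvPiece "Europe" pvEU s ++
  pvPiece "Asia Pacific" pvAP s ++ pvPiece "Middle East & Africa" pvMEA s ++ pvPieceO s

-- scanning a block of pairs that all map to the same region
theorem pv_get?_block (codes : List String) (r : String) (rest : List (String × String)) (c : String) :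
    (PySem.Dict.mk (codes.map (fun code => (code, r)) ++ rest)).get? c
      = if codes.contains c then some r else (PySem.Dict.mk rest).get? c := by
  induction codes with
  | nil => simp
  | cons x xs ih =>
      simp only [List.map_cons, List.cons_append, PySem.Dict.get?_mk_cons, ih, List.contains_cons]
      by_cases h : x = c
      · subst h; simp
      · have h' : ¬ c = x := fun hh => h hh.symm
        simp [h, h']

theorem pv_regionOf_mk : pvRegionOf = PySem.Dict.mk
    (pvNA.map (fun code => (code, "North America")) ++
     (pvLA.map (fun code => (code, "Latin America")) ++
      (pvEU.map (fun code => (code, "Europe")) ++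
       (pvAP.map (fun code => (code, "Asia Pacific")) ++
        (pvMEA.map (fun code => (code, "Middle East & Africa")) ++ []))))) := by
  set_option maxRecDepth 10000 in decide

-- the reverse map looked up at any code is the first region whose code list contains it
theorem pv_key_eq (c : String) :
    pvRegionOf.getD c "Other" =
      (if pvNA.contains c then "North America"
       else if pvLA.contains c then "Latin America"
       else if pvEU.contains c then "Europe"
       else if pvAP.contains c then "Asia Pacific"
       else if pvMEA.contains c then "Middle East & Africa"
       else "Other") := by
  rw [PySem.Dict.getD_eq_get?_getD, pv_regionOf_mk, pv_get?_block, pv_get?_block, pv_get?_block,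
    pv_get?_block, pv_get?_block]
  split_ifs <;> simp [PySem.Dict.get?]

theorem pv_cf (A B : List String) (c : String) (hd : A.all (fun x => !B.contains x) = true)
    (h : A.contains c = true) : B.contains c = false := by
  have hc : c ∈ A := by simpa using h
  simpa using List.all_eq_true.mp hd c hc

theorem pv_beq_NA (c : String) :
    (pvRegionOf.getD c "Other" == "North America") = pvNA.contains c := by
  rw [pv_key_eq]; split_ifs <;> simp_all

theorem pv_beq_LA (c : String) :
    (pvRegionOf.getD c "Other" == "Latin America") = pvLA.contains c := by
  rw [pv_key_eq]; split_ifs with h1 <;>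
    first
      | (have := pv_cf pvNA pvLA c (by set_option maxRecDepth 10000 in decide) h1; simp_all)
      | simp_all

theorem pv_beq_EU (c : String) :
    (pvRegionOf.getD c "Other" == "Europe") = pvEU.contains c := by
  rw [pv_key_eq]; split_ifs with h1 h2 <;>
    first
      | (have := pv_cf pvNA pvEU c (by set_option maxRecDepth 10000 in decide) h1; simp_all)
      | (have := pv_cf pvLA pvEU c (by set_option maxRecDepth 10000 in decide) h2; simp_all)
      | simp_all

theorem pv_beq_AP (c : String) :
    (pvRegionOf.getD c "Other" == "Asia Pacific") = pvAP.contains c := by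
  rw [pv_key_eq]; split_ifs with h1 h2 h3 <;>
    first
      | (have := pv_cf pvNA pvAP c (by set_option maxRecDepth 10000 in decide) h1; simp_all)
      | (have := pv_cf pvLA pvAP c (by set_option maxRecDepth 10000 in decide) h2; simp_all)
      | (have := pv_cf pvEU pvAP c (by set_option maxRecDepth 10000 in decide) h3; simp_all)
      | simp_all

theorem pv_beq_MEA (c : String) :
    (pvRegionOf.getD c "Other" == "Middle East & Africa") = pvMEA.contains c := by
  rw [pv_key_eq]; split_ifs with h1 h2 h3 h4 <;>
    first
      | (have := pv_cf pvNA pvMEA c (by set_option maxRecDepth 10000 in decide) h1; simp_all)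
      | (have := pv_cf pvLA pvMEA c (by set_option maxRecDepth 10000 in decide) h2; simp_all)
      | (have := pv_cf pvEU pvMEA c (by set_option maxRecDepth 10000 in decide) h3; simp_all)
      | (have := pv_cf pvAP pvMEA c (by set_option maxRecDepth 10000 in decide) h4; simp_all)
      | simp_all

theorem pv_beq_Other (c : String) :
    (pvRegionOf.getD c "Other" == "Other") = pvOtherPred c := by
  rw [pv_key_eq]; unfold pvOtherPred; split_ifs <;> simp_all

-- one output piece of B equals the corresponding normal-form piece
theorem pv_pieceB (s : List String) (n : String) (codes : List String)
    (hpt : ∀ c, (pvRegionOf.getD c "Other" == n) = codes.contains c) :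
    (if (s.map (fun c => pvRegionOf.getD c "Other")).contains n
     then [(n, ((s.map (fun c => pvRegionOf.getD c "Other")).count n : Int))] else [])
    = pvPiece n codes s := by
  have hcount : (s.map (fun c => pvRegionOf.getD c "Other")).count n
      = (s.filter (fun c => codes.contains c)).length := by
    rw [List.count_eq_countP, List.countP_map, (Eq.symm List.countP_eq_length_filter)]
    exact List.countP_congr (fun c _ => by simp only [Function.comp_apply]; rw [hpt c])
  have hcond : ((s.map (fun c => pvRegionOf.getD c "Other")).contains n = true)
      ↔ (s.filter (fun c => codes.contains c) ≠ []) := by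
    simp only [ne_eq, List.filter_eq_nil_iff, List.contains_eq_mem, decide_eq_true_eq, List.mem_map]
    push Not
    constructor
    · rintro ⟨c, hc, hkey⟩
      exact ⟨c, hc, by have h := hpt c; rw [hkey] at h; simpa using h.symm⟩
    · rintro ⟨c, hc, hcodes⟩
      refine ⟨c, hc, ?_⟩
      have h := hpt c
      rw [show codes.contains c = true by simpa using hcodes] at h
      simpa using h
  unfold pvPiece
  simp only [hcount]
  exact if_congr hcond rfl rfl

theorem pv_pieceB_Other (s : List String) :
    (if (s.map (fun c => pvRegionOf.getD c "Other")).contains "Other"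
     then [("Other", ((s.map (fun c => pvRegionOf.getD c "Other")).count "Other" : Int))] else [])
    = pvPieceO s := by
  have hcount : (s.map (fun c => pvRegionOf.getD c "Other")).count "Other"
      = (s.filter pvOtherPred).length := by
    rw [List.count_eq_countP, List.countP_map, (Eq.symm List.countP_eq_length_filter)]
    exact List.countP_congr (fun c _ => by simp only [Function.comp_apply]; rw [pv_beq_Other c])
  have hcond : ((s.map (fun c => pvRegionOf.getD c "Other")).contains "Other" = true)
      ↔ (s.filter pvOtherPred ≠ []) := by
    simp only [ne_eq, List.filter_eq_nil_iff, List.contains_eq_mem, decide_eq_true_eq, List.mem_map]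
    push Not
    constructor
    · rintro ⟨c, hc, hkey⟩
      exact ⟨c, hc, by have h := pv_beq_Other c; rw [hkey] at h; simpa using h.symm⟩
    · rintro ⟨c, hc, hp⟩
      refine ⟨c, hc, ?_⟩
      have h := pv_beq_Other c
      rw [hp] at h
      simpa using h
  unfold pvPieceO
  rw [pv_uncat_eq]
  simp only [hcount]
  exact if_congr hcond rfl rfl

theorem pv_filtermap_cons (p : String → Bool) (g : String → String × Int) (x : String) (xs : List String) :
    ((x :: xs).filter p).map g = (if p x then [g x] else []) ++ (xs.filter p).map g := by
  by_cases h : p x <;> simp [h]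

-- B in normal form
theorem pvB_eq (markets : List String) :
    compute_market_breakdown_py_alt markets = pvNF (PySem.Set.ofList markets) := by
  unfold compute_market_breakdown_py_alt
  have hcounter : (PySem.Set.ofList markets).foldl
      (fun (counts : PySem.Dict String Int) code =>
        let region := pvRegionOf.getD code "Other"
        counts.insert region (counts.getD region 0 + 1)) PySem.Dict.empty
      = PySem.Dict.counter ((PySem.Set.ofList markets).map (fun c => pvRegionOf.getD c "Other")) := by
    rw [← PySem.Dict.foldl_insert_getD_add_one_eq_counter, List.foldl_map]
  rw [hcounter]
  simp only [pvRegionOrder,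
    PySem.Dict.contains_counter, PySem.Dict.getD_counter,
    pv_filtermap_cons, List.filter_nil, List.map_nil, List.append_nil]
  rw [pv_pieceB _ _ _ pv_beq_NA, pv_pieceB _ _ _ pv_beq_LA, pv_pieceB _ _ _ pv_beq_EU,
    pv_pieceB _ _ _ pv_beq_AP, pv_pieceB _ _ _ pv_beq_MEA, pv_pieceB_Other]
  simp [pvNF, List.append_assoc]

-- conditional-insert helpers for A's breakdown dict
theorem pv_items_ite (d : PySem.Dict String Int) (k : String) (v : Int) (P : Prop) [Decidable P]
    (h : d.contains k = false) :
    (if P then d.insert k v else d).items = d.items ++ (if P then [(k, v)] else []) := by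
  split_ifs with hP
  · exact PySem.Dict.items_insert_of_not_contains _ v h
  · simp

theorem pv_contains_ite (d : PySem.Dict String Int) (k k' : String) (v : Int) (P : Prop) [Decidable P]
    (h : (k' == k) = false) :
    (if P then d.insert k v else d).contains k' = d.contains k' := by
  split_ifs with hP
  · rw [PySem.Dict.contains_insert, h, Bool.false_or]
  · rfl

-- A's chain of conditional inserts into the fresh-keyed breakdown dict, abstractly
theorem pv_chain (P1 P2 P3 P4 P5 P6 : Prop) [Decidable P1] [Decidable P2] [Decidable P3]
    [Decidable P4] [Decidable P5] [Decidable P6] (v1 v2 v3 v4 v5 v6 : Int)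
    (d1 d2 d3 d4 d5 d6 : PySem.Dict String Int)
    (h1 : d1 = if P1 then (PySem.Dict.empty : PySem.Dict String Int).insert "North America" v1 else PySem.Dict.empty)
    (h2 : d2 = if P2 then d1.insert "Latin America" v2 else d1)
    (h3 : d3 = if P3 then d2.insert "Europe" v3 else d2)
    (h4 : d4 = if P4 then d3.insert "Asia Pacific" v4 else d3)
    (h5 : d5 = if P5 then d4.insert "Middle East & Africa" v5 else d4)
    (h6 : d6 = if P6 then d5.insert "Other" v6 else d5) :
    d6.items = (if P1 then [("North America", v1)] else []) ++
      (if P2 then [("Latin America", v2)] else []) ++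
      (if P3 then [("Europe", v3)] else []) ++
      (if P4 then [("Asia Pacific", v4)] else []) ++
      (if P5 then [("Middle East & Africa", v5)] else []) ++
      (if P6 then [("Other", v6)] else []) := by
  have hc1 : ∀ k, (k == "North America") = false → d1.contains k = false := fun k hk => by
    rw [h1, pv_contains_ite _ _ _ _ _ hk]; rfl
  have hc2 : ∀ k, (k == "North America") = false → (k == "Latin America") = false →
      d2.contains k = false := fun k hk1 hk2 => by
    rw [h2, pv_contains_ite _ _ _ _ _ hk2]; exact hc1 k hk1
  have hc3 : ∀ k, (k == "North America") = false → (k == "Latin America") = false →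
      (k == "Europe") = false → d3.contains k = false := fun k hk1 hk2 hk3 => by
    rw [h3, pv_contains_ite _ _ _ _ _ hk3]; exact hc2 k hk1 hk2
  have hc4 : ∀ k, (k == "North America") = false → (k == "Latin America") = false →
      (k == "Europe") = false → (k == "Asia Pacific") = false → d4.contains k = false :=
    fun k hk1 hk2 hk3 hk4 => by
    rw [h4, pv_contains_ite _ _ _ _ _ hk4]; exact hc3 k hk1 hk2 hk3
  have hc5 : ∀ k, (k == "North America") = false → (k == "Latin America") = false →
      (k == "Europe") = false → (k == "Asia Pacific") = false →
      (k == "Middle East & Africa") = false → d5.contains k = false :=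
    fun k hk1 hk2 hk3 hk4 hk5 => by
    rw [h5, pv_contains_ite _ _ _ _ _ hk5]; exact hc4 k hk1 hk2 hk3 hk4
  rw [h6, pv_items_ite _ _ _ _ (hc5 "Other" rfl rfl rfl rfl rfl),
    h5, pv_items_ite _ _ _ _ (hc4 "Middle East & Africa" rfl rfl rfl rfl),
    h4, pv_items_ite _ _ _ _ (hc3 "Asia Pacific" rfl rfl rfl),
    h3, pv_items_ite _ _ _ _ (hc2 "Europe" rfl rfl),
    h2, pv_items_ite _ _ _ _ (hc1 "Latin America" rfl),
    h1, pv_items_ite _ _ _ _ (by rfl : (PySem.Dict.empty : PySem.Dict String Int).contains "North America" = false)]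
  simp [List.append_assoc, PySem.Dict.empty]

-- A in normal form
theorem pvA_eq (markets : List String) :
    compute_market_breakdown_py markets = pvNF (PySem.Set.ofList markets) := by
  unfold compute_market_breakdown_py pvNF pvPiece pvPieceO pvUncat
  simp only [pvMarketRegions, List.foldl_cons, List.foldl_nil]
  exact pv_chain
    (PySem.Set.inter (PySem.Set.ofList markets) pvNA ≠ [])
    (PySem.Set.inter (PySem.Set.ofList markets) pvLA ≠ [])
    (PySem.Set.inter (PySem.Set.ofList markets) pvEU ≠ [])
    (PySem.Set.inter (PySem.Set.ofList markets) pvAP ≠ [])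
    (PySem.Set.inter (PySem.Set.ofList markets) pvMEA ≠ [])
    (((((((PySem.Set.ofList markets).diff pvNA).diff pvLA).diff pvEU).diff pvAP).diff pvMEA) ≠ [])
    (PySem.Set.inter (PySem.Set.ofList markets) pvNA).len
    (PySem.Set.inter (PySem.Set.ofList markets) pvLA).len
    (PySem.Set.inter (PySem.Set.ofList markets) pvEU).len
    (PySem.Set.inter (PySem.Set.ofList markets) pvAP).len
    (PySem.Set.inter (PySem.Set.ofList markets) pvMEA).len
    (((((((PySem.Set.ofList markets).diff pvNA).diff pvLA).diff pvEU).diff pvAP).diff pvMEA)).len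
    _ _ _ _ _ _ rfl rfl rfl rfl rfl rfl

-- ===== VERDICT (by name: the statement is the Claim_ definition above) =====
theorem compute_market_breakdown_py_spec : Claim_equal_compute_market_breakdown_py := by
  intro markets _
  unfold Spec_compute_market_breakdown_py
  rw [pvA_eq, pvB_eq]
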